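-- pv_equiv track=rewrite | github.com/BaguetteWarrior/cant_stop | canstop(2).py | prudent
-- ===== SOURCE A (Python) =====
-- def prudent(pos, choix, oya):
--     '''Continue si il n'a pas de risque'''
--     grimpeurs = pos[oya]['grimpeurs']
--     L = list(grimpeurs)
--     n = len(choix)
--     M = []
--     for i in range(n):
--         a, b = choix[i]
--         M.append((len(set(L+[a, b])), i))
--     M.sort()
--     ng, no_choix = M[0]
--     if ng < 3:
--         return no_choix, True
--     else:
--         return no_choix, False
-- ===== SOURCE B (Python) =====
-- def prudent(pos, choix, oya):
--     '''Continue si il n'a pas de risque'''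
--     L = pos[oya]['grimpeurs']
--     best = None
--     for i, (a, b) in enumerate(choix):
--         ng = len(set(L + [a, b]))
--         if best is None or ng < best[0]:
--             best = (ng, i)
--     ng, no_choix = best
--     return no_choix, ng < 3
-- ===== Notes on version B (the rewrite author's own statement) =====
-- stated objective: simpler
-- what changed: replaces building the whole (count,index) list and sorting it with a single linear argmin scan that keeps the best (count,index) pair, strict-less update preserving the lowest-index tie-break
import Mathlib
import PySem

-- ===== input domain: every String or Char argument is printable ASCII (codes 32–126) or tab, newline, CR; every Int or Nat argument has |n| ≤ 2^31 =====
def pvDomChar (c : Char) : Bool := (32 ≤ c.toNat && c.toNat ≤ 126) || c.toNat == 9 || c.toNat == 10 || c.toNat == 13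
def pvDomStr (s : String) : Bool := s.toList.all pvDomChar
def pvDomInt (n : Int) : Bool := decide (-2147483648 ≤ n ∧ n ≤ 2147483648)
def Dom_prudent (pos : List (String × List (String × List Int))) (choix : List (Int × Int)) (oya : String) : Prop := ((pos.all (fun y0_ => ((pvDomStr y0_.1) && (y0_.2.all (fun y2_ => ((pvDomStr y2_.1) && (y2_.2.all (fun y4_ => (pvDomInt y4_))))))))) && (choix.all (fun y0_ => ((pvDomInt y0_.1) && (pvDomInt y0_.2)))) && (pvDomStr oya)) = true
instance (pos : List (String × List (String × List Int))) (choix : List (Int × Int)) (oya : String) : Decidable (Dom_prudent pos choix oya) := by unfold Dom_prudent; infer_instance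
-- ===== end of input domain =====

-- B replaces build-list + sort + take-first with one linear argmin scan (simpler, no sort).

-- shared helper: pos[oya]['grimpeurs'] (dict lookup = first match; default [] only reached outside Pre_)
def pvGrimpeurs (pos : List (String × List (String × List Int))) (oya : String) : List Int :=
  (((PySem.Dict.mk pos).get? oya).bind (fun d => (PySem.Dict.mk d).get? "grimpeurs")).getD []

-- ===== PORT A =====
def prudent (pos : List (String × List (String × List Int))) (choix : List (Int × Int)) (oya : String) : Int × Bool :=
  let grimpeurs := pvGrimpeurs pos oya
  let L := grimpeurs
  let n := PySem.List.len choix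
  let M : List (Int × Int) :=
    (PySem.List.pyRange 0 n 1).foldl
      (fun M i =>
        let ab := PySem.List.pyGetD choix i (0, 0)
        M ++ [(PySem.Set.len (PySem.Set.ofList (L ++ [ab.1, ab.2])), i)]) []
  let Ms := PySem.List.sorted2 M (fun p => p.1) (fun p => p.2) false
  let hd := PySem.List.pyGetD Ms 0 (0, 0)   -- M[0]; IndexError on empty choix is excluded by Pre_
  if hd.1 < 3 then (hd.2, true) else (hd.2, false)

-- ===== PORT B =====
def prudent_alt (pos : List (String × List (String × List Int))) (choix : List (Int × Int)) (oya : String) : Int × Bool :=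
  let L := pvGrimpeurs pos oya
  let best : Option (Int × Int) :=
    (PySem.List.enumerate choix 0).foldl
      (fun best p =>
        let ng : Int := PySem.Set.len (PySem.Set.ofList (L ++ [p.2.1, p.2.2]))
        match best with
        | none => some (ng, p.1)
        | some b => if ng < b.1 then some (ng, p.1) else some b)
      none
  match best with
  | some (ng, i) => (i, decide (ng < 3))
  | none => (0, false)   -- unreachable under Pre_ (choix ≠ []); Python B raises here

-- ===== PRECONDITION & SPEC =====
-- Pre_ excludes exactly the inputs on which Python A raises: a missing oya / 'grimpeurs' key (KeyError)
-- and an empty choix (IndexError at M[0]).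
def Pre_prudent (pos : List (String × List (String × List Int))) (choix : List (Int × Int)) (oya : String) : Prop :=
  ((((PySem.Dict.mk pos).get? oya).bind (fun d => (PySem.Dict.mk d).get? "grimpeurs")).isSome = true) ∧ choix ≠ []
instance (pos : List (String × List (String × List Int))) (choix : List (Int × Int)) (oya : String) : Decidable (Pre_prudent pos choix oya) := by unfold Pre_prudent; infer_instance

def pvWitness_prudent : (List (String × List (String × List Int))) × (List (Int × Int)) × String :=
  ([("p", [("grimpeurs", [1, 2])])], [(3, 4)], "p")

def Spec_prudent (pos : List (String × List (String × List Int))) (choix : List (Int × Int)) (oya : String) (out : Int × Bool) : Prop := out = prudent_alt pos choix oya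
instance (pos : List (String × List (String × List Int))) (choix : List (Int × Int)) (oya : String) (out : Int × Bool) : Decidable (Spec_prudent pos choix oya out) := by unfold Spec_prudent; infer_instance

-- ===== CLAIM (what is proved, stated in full; the proofs are below) =====
def Claim_equal_prudent : Prop := ∀ (pos : List (String × List (String × List Int))) (choix : List (Int × Int)) (oya : String), Dom_prudent pos choix oya → Pre_prudent pos choix oya → Spec_prudent pos choix oya (prudent pos choix oya)

-- ===== LEMMAS AND PROOFS =====

theorem pv_head_foldl_insertBy {α : Type} (before : α → α → Bool) :
    ∀ (xs : List α) (c : α) (rest : List α),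
      (xs.foldl (fun acc x => PySem.List.insertBy before x acc) (c :: rest)).head? =
        some (xs.foldl (fun cur x => if before x cur then x else cur) c) := by
  intro xs
  induction xs with
  | nil => intro c rest; simp
  | cons x xs ih =>
    intro c rest
    simp only [List.foldl_cons, PySem.List.insertBy]
    by_cases h : before x c = true
    · simp [h, ih]
    · simp [h, ih]

theorem pv_lex_fold_eq (f : Int → Int) :
    ∀ (is_ : List Int) (c : Int × Int), (∀ i ∈ is_, c.2 < i) → is_.Pairwise (· < ·) →
      is_.foldl (fun cur i =>
          if (decide ((f i) < cur.1) || (!decide (cur.1 < (f i)) && decide (i < cur.2))) = true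
          then (f i, i) else cur) c =
      is_.foldl (fun cur i => if f i < cur.1 then (f i, i) else cur) c := by
  intro is_
  induction is_ with
  | nil => intro c _ _; simp
  | cons i is ih =>
    intro c hlt hp
    have hci : c.2 < i := hlt i (by simp)
    have h2 : decide (i < c.2) = false := by simp; omega
    simp only [List.foldl_cons, h2, Bool.and_false, Bool.or_false]
    rw [List.pairwise_cons] at hp
    by_cases h : f i < c.1
    · have := ih (f i, i) (fun j hj => hp.1 j hj) hp.2
      simpa [h] using this
    · have := ih c (fun j hj => lt_trans hci (hp.1 j hj)) hp.2
      simpa [h] using this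

theorem pv_option_fold (f : Int → Int) :
    ∀ (is_ : List Int) (c : Int × Int),
      is_.foldl (fun b i => match b with
        | none => some (f i, i)
        | some bb => if f i < bb.1 then some (f i, i) else some bb) (some c) =
      some (is_.foldl (fun cur i => if f i < cur.1 then (f i, i) else cur) c) := by
  intro is_
  induction is_ with
  | nil => intro c; simp
  | cons i is ih =>
    intro c
    simp only [List.foldl_cons]
    by_cases h : f i < c.1
    · simp [h, ih]
    · simp [h, ih]

theorem pv_main (pos : List (String × List (String × List Int))) (choix : List (Int × Int)) (oya : String)
    (hne : choix ≠ []) : prudent pos choix oya = prudent_alt pos choix oya := by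
  unfold prudent prudent_alt
  set L := pvGrimpeurs pos oya with hLdef
  set f : Int → Int := fun i =>
    PySem.Set.len (PySem.Set.ofList (L ++ [(PySem.List.pyGetD choix i (0, 0)).1, (PySem.List.pyGetD choix i (0, 0)).2])) with hf
  obtain ⟨m, hm⟩ : ∃ m, choix.length = m + 1 := by
    cases choix with
    | nil => exact absurd rfl hne
    | cons a t => exact ⟨t.length, rfl⟩
  have hR : PySem.List.pyRange 0 (PySem.List.len choix) 1 =
      (0 : Int) :: (List.range m).map (fun k => ((k + 1 : Nat) : Int)) := by
    rw [PySem.List.len_eq, hm, PySem.List.pyRange_zero_natCast, List.range_succ_eq_map]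
    simp [Function.comp, Nat.succ_eq_add_one]
  have hpair : ((List.range m).map (fun k => ((k + 1 : Nat) : Int))).Pairwise (· < ·) := by
    refine List.Pairwise.map _ ?_ (List.pairwise_lt_range)
    intro a b hab; exact_mod_cast Nat.add_lt_add_right hab 1
  have hpos : ∀ i ∈ (List.range m).map (fun k => ((k + 1 : Nat) : Int)), (0 : Int) < i := by
    intro i hi
    simp only [List.mem_map] at hi
    obtain ⟨k, _, rfl⟩ := hi
    exact_mod_cast Nat.succ_pos k
  have hins : ∀ (bf : (Int × Int) → (Int × Int) → Bool) (x : Int × Int),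
      PySem.List.insertBy bf x ([] : List (Int × Int)) = [x] := fun _ _ => rfl
  have hgd : ∀ (xs : List (Int × Int)) (d hd : Int × Int), xs.head? = some hd →
      PySem.List.pyGetD xs 0 d = hd := by
    intro xs d hd h
    cases xs with
    | nil => simp at h
    | cons a t => simp at h; simp [PySem.List.pyGetD_zero, h]
  have hhead := pv_head_foldl_insertBy
      (fun a b : Int × Int => decide (a.1 < b.1) || (!decide (b.1 < a.1) && decide (a.2 < b.2)))
      (((List.range m).map (fun k => ((k + 1 : Nat) : Int))).map (fun i => (f i, i)))
      (f 0, 0) []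
  have hlex := pv_lex_fold_eq f ((List.range m).map (fun k => ((k + 1 : Nat) : Int))) (f 0, 0) hpos hpair
  have hopt := pv_option_fold f ((List.range m).map (fun k => ((k + 1 : Nat) : Int))) (f 0, 0)
  simp only [List.foldl_map, Nat.cast_add, Nat.cast_one] at hhead hlex hopt
  rw [hlex] at hhead
  simp only [PySem.List.enumerate_eq_map_pyRange choix (0, 0), hR, List.map_cons,
    List.foldl_cons, List.foldl_map, PySem.List.foldl_append_singleton_eq_map,
    List.nil_append, PySem.List.sorted2, List.singleton_append, hins,
    Bool.false_eq_true, if_false, Nat.cast_add, Nat.cast_one]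
  rw [hgd _ _ _ hhead, hopt]
  split_ifs with h3 <;> simp [h3]

-- ===== VERDICT (by name: the statement is the Claim_ definition above) =====
theorem prudent_spec : Claim_equal_prudent := by
  intro pos choix oya _ hpre
  unfold Spec_prudent
  exact pv_main pos choix oya hpre.2
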